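-- pv_equiv track=rewrite | github.com/Leapense/problems | 25093번: Double or One Thing/solution.py | solve
-- ===== SOURCE A (Python) =====
-- def solve(s):
--     n = len(s)
--     result = []
--
--     for i in range(n):
--         result.append(s[i])
--         if i < n - 1:
--             j = i + 1
--             while j < n and s[j] == s[i]:
--                 j += 1
--             if j < n and s[i] < s[j]:
--                 result.append(s[i])
--     return ''.join(result)
-- ===== SOURCE B (Python) =====
-- def solve(s):
--     # One backward pass: track the next distinct character; O(n) instead of A's nested scan.
--     out = []
--     prev = None  # character at position i+1
--     nd = None    # first character after position i that differs from s[i+1]... maintained so that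
--                  # at each step nd = next character different from current one (after update below)
--     for c in reversed(s):
--         if prev is not None and prev != c:
--             nd = prev
--         out.append(c)
--         if nd is not None and c < nd:
--             out.append(c)
--         prev = c
--     out.reverse()
--     return ''.join(out)
-- ===== Notes on version B (the rewrite author's own statement) =====
-- stated objective: faster
-- what changed: Replaced A's per-index inner while-scan for the next distinct character by a single backward pass that maintains the next distinct character in O(1) per position.
import Mathlib
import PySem

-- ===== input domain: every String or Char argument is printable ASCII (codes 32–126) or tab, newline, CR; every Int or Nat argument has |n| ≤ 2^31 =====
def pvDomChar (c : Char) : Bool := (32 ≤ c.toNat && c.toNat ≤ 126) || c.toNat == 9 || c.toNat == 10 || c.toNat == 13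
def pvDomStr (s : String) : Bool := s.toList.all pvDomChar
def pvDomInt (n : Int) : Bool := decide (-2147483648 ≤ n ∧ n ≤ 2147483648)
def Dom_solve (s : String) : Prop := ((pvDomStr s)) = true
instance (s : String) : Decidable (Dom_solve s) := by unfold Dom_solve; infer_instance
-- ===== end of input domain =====

-- B replaces A's per-index inner while-scan with one backward pass carrying the
-- next distinct character (O(n) instead of O(n^2)); return values are identical.

-- ===== PORT A =====
-- the inner 'while j < n and s[j] == s[i]: j += 1' loop of A
def solveWhileJ (cs : List Char) (c : Char) (j : Nat) : Nat :=
  if h : j < cs.length then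
    if cs[j] = c then solveWhileJ cs c (j + 1) else j
  else j
termination_by cs.length - j

-- the 'for i in range(n)' loop of A, accumulating 'result'
def solveLoopA (cs : List Char) (i : Nat) (acc : List Char) : List Char :=
  if h : i < cs.length then
    solveLoopA cs (i + 1)
      (if i < cs.length - 1 then
        if hj : solveWhileJ cs cs[i] (i + 1) < cs.length then
          if cs[i] < cs[solveWhileJ cs cs[i] (i + 1)] then (acc ++ [cs[i]]) ++ [cs[i]]
          else acc ++ [cs[i]]
        else acc ++ [cs[i]]
      else acc ++ [cs[i]])
  else acc
termination_by cs.length - i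

def solve (s : String) : String := String.mk (solveLoopA s.toList 0 [])

-- ===== PORT B =====
-- B's single loop over reversed(s), carrying prev (char at i+1) and nd (next distinct char)
def solveLoopB (rcs : List Char) (prev nd : Option Char) (out : List Char) : List Char :=
  match rcs with
  | [] => out
  | c :: rest =>
    let nd1 := match prev with
      | some p => if p ≠ c then some p else nd
      | none => nd
    let out1 := out ++ [c]
    let out2 := match nd1 with
      | some d => if c < d then out1 ++ [c] else out1
      | none => out1
    solveLoopB rest (some c) nd1 out2

def solve_alt (s : String) : String :=
  String.mk (solveLoopB s.toList.reverse none none []).reverse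

-- ===== PRECONDITION & SPEC =====
def Spec_solve (s : String) (out : String) : Prop := out = solve_alt s
instance (s : String) (out : String) : Decidable (Spec_solve s out) := by unfold Spec_solve; infer_instance

-- ===== CLAIM (what is proved, stated in full; the proofs are below) =====
def Claim_equal_solve : Prop := ∀ (s : String), Dom_solve s → Spec_solve s (solve s)

-- ===== LEMMAS AND PROOFS =====

-- the contribution of one position: its char, doubled iff the next distinct char is larger
def dup (c : Char) (suf : List Char) : List Char :=
  match (suf.dropWhile (fun x => x == c)).head? with
  | some d => if c < d then [c, c] else [c]
  | none => [c]

-- common specification both ports are reduced to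
def specG : List Char → List Char
  | [] => []
  | c :: r => dup c r ++ specG r

lemma wj_le (cs : List Char) (c : Char) (j : Nat) (hj : j ≤ cs.length) :
    solveWhileJ cs c j ≤ cs.length := by
  unfold solveWhileJ
  split
  · split
    · exact wj_le cs c (j + 1) (by omega)
    · omega
  · omega
termination_by cs.length - j

lemma wj_drop (cs : List Char) (c : Char) (j : Nat) :
    cs.drop (solveWhileJ cs c j) = (cs.drop j).dropWhile (fun x => x == c) := by
  unfold solveWhileJ
  split
  · rename_i h
    have hdj : cs.drop j = cs[j] :: cs.drop (j + 1) := List.drop_eq_getElem_cons h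
    split
    · rename_i hc
      rw [wj_drop cs c (j + 1), hdj, List.dropWhile_cons_of_pos (by simp [hc])]
    · rename_i hc
      rw [hdj, List.dropWhile_cons_of_neg (by simp [hc])]
  · rename_i h
    simp [List.drop_eq_nil_of_le (show cs.length ≤ j by omega)]
termination_by cs.length - j

-- the chunk A appends at position i equals `dup cs[i] (cs.drop (i+1))`
lemma chunkA (cs : List Char) (i : Nat) (h : i < cs.length) (acc : List Char) :
    (if i < cs.length - 1 then
        if hj : solveWhileJ cs cs[i] (i + 1) < cs.length then
          if cs[i] < cs[solveWhileJ cs cs[i] (i + 1)] then (acc ++ [cs[i]]) ++ [cs[i]]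
          else acc ++ [cs[i]]
        else acc ++ [cs[i]]
      else acc ++ [cs[i]]) = acc ++ dup cs[i] (cs.drop (i + 1)) := by
  by_cases hi : i < cs.length - 1
  · simp only [if_pos hi]
    set j := solveWhileJ cs cs[i] (i + 1) with hj
    have hdrop : cs.drop j = (cs.drop (i + 1)).dropWhile (fun x => x == cs[i]) :=
      wj_drop cs cs[i] (i + 1)
    have hjle : j ≤ cs.length := wj_le cs cs[i] (i + 1) (by omega)
    by_cases hjn : j < cs.length
    · have hdj : cs.drop j = cs[j] :: cs.drop (j + 1) := List.drop_eq_getElem_cons hjn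
      have hhead : ((cs.drop (i + 1)).dropWhile (fun x => x == cs[i])).head? = some cs[j] := by
        rw [← hdrop, hdj]; rfl
      simp only [dif_pos hjn, dup, hhead]
      by_cases hlt : cs[i] < cs[j] <;> simp [hlt, List.append_assoc]
    · have hje : j = cs.length := by omega
      have hnil : (cs.drop (i + 1)).dropWhile (fun x => x == cs[i]) = [] := by
        rw [← hdrop, hje, List.drop_length]
      simp [dif_neg hjn, dup, hnil]
  · have hie : i = cs.length - 1 := by omega
    have hnil : cs.drop (i + 1) = [] := List.drop_eq_nil_of_le (by omega)
    simp [hi, dup, hnil]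

lemma loopA_spec (cs : List Char) (i : Nat) (acc : List Char) :
    solveLoopA cs i acc = acc ++ specG (cs.drop i) := by
  unfold solveLoopA
  split
  · rename_i h
    have hdi : cs.drop i = cs[i] :: cs.drop (i + 1) := List.drop_eq_getElem_cons h
    rw [loopA_spec cs (i + 1), chunkA cs i h acc, hdi]
    simp [specG, List.append_assoc]
  · rename_i h
    rw [List.drop_eq_nil_of_le (by omega)]
    simp [specG]
termination_by cs.length - i

-- B side: the next-distinct-character update of one step
def updNd (prev nd : Option Char) (c : Char) : Option Char :=
  match prev with
  | some p => if p ≠ c then some p else nd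
  | none => nd

-- B side: pure version of solveLoopB's output growth
def hB : List Char → Option Char → Option Char → List Char
  | [], _, _ => []
  | c :: rest, prev, nd =>
    (match updNd prev nd c with
      | some d => if c < d then [c, c] else [c]
      | none => [c]) ++ hB rest (some c) (updNd prev nd c)

lemma loopB_hB (rcs : List Char) (prev nd : Option Char) (out : List Char) :
    solveLoopB rcs prev nd out = out ++ hB rcs prev nd := by
  induction rcs generalizing prev nd out with
  | nil => simp [solveLoopB, hB]
  | cons c rest ih =>
    simp only [solveLoopB, hB, updNd]
    cases prev with
    | none =>
      cases nd with
      | none => simp [ih]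
      | some d => by_cases hlt : c < d <;> simp [hlt, ih, List.append_assoc]
    | some p =>
      by_cases hp : p ≠ c
      · simp only [if_pos hp]
        by_cases hlt : c < p <;> simp [hlt, ih, List.append_assoc]
      · simp only [if_neg hp]
        cases nd with
        | none => simp [ih]
        | some d => by_cases hlt : c < d <;> simp [hlt, ih, List.append_assoc]

-- the state invariant of B's backward pass
def BInv (suf : List Char) (prev nd : Option Char) : Prop :=
  suf.head? = prev ∧
  ∀ c : Char, updNd prev nd c = ((suf.dropWhile (fun x => x == c)).head?)

-- generalisation of specG with a right context
def specG' : List Char → List Char → List Char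
  | [], _ => []
  | c :: r, suf => dup c (r ++ suf) ++ specG' r suf

lemma specG'_append (a b suf : List Char) :
    specG' (a ++ b) suf = specG' a (b ++ suf) ++ specG' b suf := by
  induction a with
  | nil => simp [specG']
  | cons c r ih => simp [specG', ih, List.append_assoc]

lemma specG'_nil (l : List Char) : specG' l [] = specG l := by
  induction l with
  | nil => simp [specG', specG]
  | cons c r ih => simp [specG', specG, ih]

lemma dup_reverse (c : Char) (suf : List Char) : (dup c suf).reverse = dup c suf := by
  unfold dup
  cases h : (suf.dropWhile (fun x => x == c)).head? with
  | none => simp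
  | some d => by_cases hlt : c < d <;> simp [hlt]

lemma hB_spec (rcs : List Char) (suf : List Char) (prev nd : Option Char)
    (hinv : BInv suf prev nd) :
    hB rcs prev nd = (specG' rcs.reverse suf).reverse := by
  induction rcs generalizing suf prev nd with
  | nil => simp [hB, specG']
  | cons c rest ih =>
    obtain ⟨hhd, hnd⟩ := hinv
    have hinv' : BInv (c :: suf) (some c) (updNd prev nd c) := by
      refine ⟨rfl, fun c' => ?_⟩
      simp only [updNd]
      by_cases hc : c ≠ c'
      · rw [if_pos hc, List.dropWhile_cons_of_neg (by simpa using hc)]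
        rfl
      · rw [if_neg hc]
        have hcc : c = c' := by by_contra h; exact hc h
        subst hcc
        rw [List.dropWhile_cons_of_pos (by simp)]
        exact hnd c
    have hrev : (c :: rest).reverse = rest.reverse ++ [c] := by simp
    rw [hrev, specG'_append]
    simp only [hB]
    rw [ih (c :: suf) (some c) _ hinv']
    have hone : specG' [c] suf = dup c suf := by simp [specG', dup]
    rw [hone, List.reverse_append, dup_reverse]
    congr 1
    unfold dup
    rw [← hnd c]

lemma solve_alt_spec (s : String) : solve_alt s = String.mk (specG s.toList) := by
  unfold solve_alt
  rw [loopB_hB, List.nil_append,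
      hB_spec s.toList.reverse [] none none ⟨rfl, fun c => rfl⟩]
  simp [specG'_nil, List.reverse_reverse]

lemma solve_eq_spec (s : String) : solve s = String.mk (specG s.toList) := by
  unfold solve
  rw [loopA_spec]
  simp

-- ===== VERDICT (by name: the statement is the Claim_ definition above) =====
theorem solve_spec : Claim_equal_solve := by
  intro s _
  unfold Spec_solve
  rw [solve_eq_spec, solve_alt_spec]
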